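-- pv_equiv track=rewrite | github.com/chauncyf/132-Vector_Space_Retrieval_System | boolean_search.py | intersect_list
-- ===== SOURCE A (Python) =====
-- def intersect_list(index_dict):
--     """
--     do intersection for two lists
--
--     :param index_dict: dict of indexes
--     :return: intersected list
--     """
--     lists = [value for value in index_dict.values()]
--     if len(lists) == 0:
--         return []
--     elif len(lists) == 1:
--         return lists[0]
--     intersected_list = lists[0]
--     for list in lists:
--         intersected_list = [value for value in intersected_list if value in list]
--     return intersected_list
-- ===== SOURCE B (Python) =====
-- def intersect_list(index_dict):
--     """
--     Intersect all index lists by occurrence counting: count, for each element,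
--     in how many of the lists it occurs (deduplicating each list first); an
--     element of the first list is kept iff its count equals the number of lists.
--     """
--     lists = list(index_dict.values())
--     if not lists:
--         return []
--     n = len(lists)
--     counts = {}
--     for l in lists:
--         for v in dict.fromkeys(l):
--             counts[v] = counts.get(v, 0) + 1
--     return [v for v in lists[0] if counts.get(v, 0) == n]
-- ===== Notes on version B (the rewrite author's own statement) =====
-- stated objective: alternative
-- what changed: Replaces A's repeated per-list filtering of a shrinking intersection list by occurrence counting: one counter records in how many lists each element occurs, and a single pass keeps the elements of the first list whose count equals the number of lists.
import Mathlib
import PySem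

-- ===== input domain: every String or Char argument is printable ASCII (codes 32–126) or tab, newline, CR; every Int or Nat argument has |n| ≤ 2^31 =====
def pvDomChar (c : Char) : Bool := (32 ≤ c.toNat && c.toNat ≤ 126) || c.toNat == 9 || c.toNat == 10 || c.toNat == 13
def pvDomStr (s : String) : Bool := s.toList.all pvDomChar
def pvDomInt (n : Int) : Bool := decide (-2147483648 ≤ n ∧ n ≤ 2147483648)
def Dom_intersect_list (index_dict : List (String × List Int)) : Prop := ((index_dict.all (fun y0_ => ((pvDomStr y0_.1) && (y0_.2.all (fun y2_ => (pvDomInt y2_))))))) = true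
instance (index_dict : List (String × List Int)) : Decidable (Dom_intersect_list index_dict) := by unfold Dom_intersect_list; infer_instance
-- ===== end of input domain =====

-- B replaces A's repeated per-list filtering by occurrence counting: one counter
-- records in how many lists each element occurs, then one pass keeps the
-- elements of the first list whose count equals the number of lists.

-- ===== PORT A =====
def intersect_list (index_dict : List (String × List Int)) : List Int :=
  let lists := index_dict.map Prod.snd
  match lists with
  | [] => []
  | [l0] => l0
  | l0 :: _ :: _ =>
    lists.foldl (fun acc l => acc.filter (fun v => decide (v ∈ l))) l0

-- ===== PORT B =====
def intersect_list_alt (index_dict : List (String × List Int)) : List Int :=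
  let lists := index_dict.map Prod.snd
  match lists with
  | [] => []
  | l0 :: _ =>
    let n : Int := lists.length
    let counts : PySem.Dict Int Int :=
      lists.foldl
        (fun d l => (PySem.List.dedup l).foldl (fun d v => d.modify v 0 (· + 1)) d)
        PySem.Dict.empty
    l0.filter (fun v => decide (counts.getD v 0 = n))

-- ===== PRECONDITION & SPEC =====
def Spec_intersect_list (index_dict : List (String × List Int)) (out : List Int) : Prop := out = intersect_list_alt index_dict
instance (index_dict : List (String × List Int)) (out : List Int) : Decidable (Spec_intersect_list index_dict out) := by unfold Spec_intersect_list; infer_instance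

-- ===== CLAIM (what is proved, stated in full; the proofs are below) =====
def Claim_equal_intersect_list : Prop := ∀ (index_dict : List (String × List Int)), Dom_intersect_list index_dict → Spec_intersect_list index_dict (intersect_list index_dict)

-- ===== LEMMAS AND PROOFS =====

-- A's fold of filters is one filter by the conjunction of the memberships.
theorem foldl_filter_eq_filter_all (ls : List (List Int)) (a : List Int) :
    ls.foldl (fun acc l => acc.filter (fun v => decide (v ∈ l))) a
      = a.filter (fun v => ls.all (fun l => decide (v ∈ l))) := by
  induction ls generalizing a with
  | nil => simp
  | cons l ls ih =>
    simp only [List.foldl_cons, ih, List.filter_filter, List.all_cons]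
    congr 1
    funext v
    exact Bool.and_comm _ _

-- B's nested counting fold is Counter of the concatenation of the deduped lists.
theorem counts_eq_counter (ls : List (List Int)) :
    ls.foldl (fun d l => (PySem.List.dedup l).foldl (fun d v => d.modify v 0 (· + 1)) d)
        PySem.Dict.empty
      = PySem.Dict.counter (ls.flatMap PySem.List.dedup) := by
  rw [PySem.Dict.counter_eq_foldl, List.foldl_flatMap]

-- The count of v in the concatenated deduped lists is the number of lists containing v.
theorem count_flatMap_dedup (ls : List (List Int)) (v : Int) :
    (ls.flatMap PySem.List.dedup).count v = ls.countP (fun l => decide (v ∈ l)) := by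
  induction ls with
  | nil => rfl
  | cons l ls ih =>
    simp only [List.flatMap_cons, List.count_append, ih, List.countP_cons,
      List.Nodup.count (PySem.List.nodup_dedup l), PySem.List.mem_dedup]
    by_cases hv : v ∈ l <;> simp [hv, Nat.add_comm]

-- B's filter predicate says exactly "v is in every list".
theorem alt_pred_iff (ls : List (List Int)) (v : Int) :
    ((PySem.Dict.counter (ls.flatMap PySem.List.dedup)).getD v 0 = (ls.length : Int))
      ↔ ∀ l ∈ ls, v ∈ l := by
  rw [PySem.Dict.getD_counter, count_flatMap_dedup]
  constructor
  · intro h l hl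
    have hle : ls.countP (fun l => decide (v ∈ l)) = ls.length := by exact_mod_cast h
    have := (List.countP_eq_length (p := fun l => decide (v ∈ l))).mp hle l hl
    simpa using this
  · intro h
    have : ls.countP (fun l => decide (v ∈ l)) = ls.length :=
      List.countP_eq_length.mpr (fun l hl => by simpa using h l hl)
    exact_mod_cast this

-- ===== VERDICT (by name: the statement is the Claim_ definition above) =====
theorem intersect_list_spec : Claim_equal_intersect_list := by
  intro index_dict _
  unfold Spec_intersect_list intersect_list intersect_list_alt
  cases h : index_dict.map Prod.snd with
  | nil => simp
  | cons l0 rest =>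
    simp only [counts_eq_counter]
    have hB : l0.filter
        (fun v => decide ((PySem.Dict.counter ((l0 :: rest).flatMap PySem.List.dedup)).getD v 0
          = ((l0 :: rest).length : Int)))
      = l0.filter (fun v => (l0 :: rest).all (fun l => decide (v ∈ l))) := by
      congr 1
      funext v
      rw [Bool.eq_iff_iff]
      simp only [decide_eq_true_eq, List.all_eq_true, decide_eq_true_eq]
      exact alt_pred_iff (l0 :: rest) v
    rw [hB]
    cases rest with
    | nil =>
      simp only [List.all_cons, List.all_nil, Bool.and_true]
      symm
      apply List.filter_eq_self.mpr
      intro v hv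
      simpa using hv
    | cons l1 rest' =>
      simp only [foldl_filter_eq_filter_all]
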